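-- pv_equiv track=rewrite | github.com/Donghan105/Resume | 必修/演算法 (Python, 小組作業, 只放自己負責的題目)/作業1/10520104_5.py | Check_0_to_8
-- ===== SOURCE A (Python) =====
-- def Check_0_to_8(puzzle):   # 不重複的0到8數字
--     detect = [0, 1, 2, 3, 4, 5, 6, 7, 8]
--     for i in range(len(puzzle)):
--         for j in range(len(puzzle[i])):
--             k = 0
--             while(k<len(detect)):
--                 if (puzzle[i][j] == detect[k]): # 若找到相同元素
--                     detect.pop(k)   # 刪除
--                     k = len(detect)  # 跳出while
--                 k+=1
--
--     if(len(detect)==0):  # 正確, list中的值皆找到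
--         return True
--     else:
--         return False
-- ===== SOURCE B (Python) =====
-- def Check_0_to_8(puzzle):
--     seen = set()
--     for row in puzzle:
--         for cell in row:
--             seen.add(cell)
--     return set(range(9)).issubset(seen)
-- ===== Notes on version B (the rewrite author's own statement) =====
-- stated objective: simpler
-- what changed: B collects every cell value into a set in one pass and returns whether {0..8} is a subset, removing A's inner while-loop that scans and pops a shrinking 'detect' list for each cell.
import Mathlib
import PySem

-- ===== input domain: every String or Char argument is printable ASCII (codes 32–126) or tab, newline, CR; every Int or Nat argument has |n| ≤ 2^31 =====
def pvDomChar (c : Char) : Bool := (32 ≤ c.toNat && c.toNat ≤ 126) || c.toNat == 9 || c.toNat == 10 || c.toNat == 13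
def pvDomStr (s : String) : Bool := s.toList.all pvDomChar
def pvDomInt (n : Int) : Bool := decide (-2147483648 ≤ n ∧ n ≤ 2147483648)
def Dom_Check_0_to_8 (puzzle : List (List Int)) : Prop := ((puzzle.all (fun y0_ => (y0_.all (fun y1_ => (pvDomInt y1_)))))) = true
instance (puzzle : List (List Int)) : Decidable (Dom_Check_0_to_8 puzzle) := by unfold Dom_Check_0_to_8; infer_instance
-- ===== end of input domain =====

-- B replaces A's per-cell scan-and-pop of a shrinking 'detect' list by one pass
-- collecting all cell values into a set plus a subset test (objective: simpler).

-- ===== PORT A =====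
-- the inner while(k<len(detect)) loop: on a match it pops index k (in range, so
-- list.pop(k) = eraseIdx k exactly) and sets k = len(detect), exiting the loop.
def scanPop (cell : Int) (detect : List Int) (k : Nat) : List Int :=
  if k < detect.length then
    (if PySem.List.pyGetD detect (k : Int) 0 == cell then detect.eraseIdx k
     else scanPop cell detect (k + 1))
  else detect
termination_by detect.length - k

def Check_0_to_8 (puzzle : List (List Int)) : Bool :=
  let detect0 : List Int := [0, 1, 2, 3, 4, 5, 6, 7, 8]
  let detect :=
    (PySem.List.pyRange 0 (PySem.List.len puzzle) 1).foldl
      (fun d i =>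
        let row := PySem.List.pyGetD puzzle i []
        (PySem.List.pyRange 0 (PySem.List.len row) 1).foldl
          (fun d j => scanPop (PySem.List.pyGetD row j 0) d 0) d)
      detect0
  decide (detect.length = 0)

-- ===== PORT B =====
def Check_0_to_8_alt (puzzle : List (List Int)) : Bool :=
  let seen : PySem.Set Int :=
    puzzle.foldl (fun s row => row.foldl (fun s c => PySem.Set.add s c) s) PySem.Set.empty
  PySem.Set.issubset (PySem.Set.ofList (PySem.List.pyRange 0 9 1)) seen

-- ===== PRECONDITION & SPEC =====
def Spec_Check_0_to_8 (puzzle : List (List Int)) (out : Bool) : Prop := out = Check_0_to_8_alt puzzle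
instance (puzzle : List (List Int)) (out : Bool) : Decidable (Spec_Check_0_to_8 puzzle out) := by unfold Spec_Check_0_to_8; infer_instance

-- ===== CLAIM (what is proved, stated in full; the proofs are below) =====
def Claim_equal_Check_0_to_8 : Prop := ∀ (puzzle : List (List Int)), Dom_Check_0_to_8 puzzle → Spec_Check_0_to_8 puzzle (Check_0_to_8 puzzle)

-- ===== LEMMAS AND PROOFS =====

-- A's scan-and-pop loop from index k erases the first occurrence of `cell`
-- in the suffix of `detect` from k on
theorem scanPop_eq (cell : Int) (detect : List Int) (k : Nat) :
    scanPop cell detect k = detect.take k ++ (detect.drop k).erase cell := by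
  fun_induction scanPop cell detect k with
  | case1 k hk heq =>
    simp only [PySem.List.pyGetD_natCast, List.getD_eq_getElem _ _ hk, beq_iff_eq] at heq
    rw [List.eraseIdx_eq_take_drop_succ, List.drop_eq_getElem_cons hk, heq,
        List.erase_cons_head]
  | case2 k hk hne ih =>
    simp only [PySem.List.pyGetD_natCast, List.getD_eq_getElem _ _ hk, beq_iff_eq] at hne
    rw [ih, List.drop_eq_getElem_cons hk, List.erase_cons_tail (by simpa using hne),
        ← List.take_concat_get]
    · simp
    · exact hk
  | case3 k hk =>
    rw [List.take_of_length_le (by omega), List.drop_of_length_le (by omega)]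
    simp

theorem scanPop_zero (cell : Int) (detect : List Int) :
    scanPop cell detect 0 = detect.erase cell := by
  simpa using scanPop_eq cell detect 0

-- folding erase over a Nodup list keeps exactly the elements not in xs
theorem foldl_erase_eq_filter (xs : List Int) : ∀ (l : List Int), l.Nodup →
    xs.foldl (fun d c => d.erase c) l = l.filter (fun d => !xs.contains d) := by
  induction xs with
  | nil => intro l _; simp
  | cons x xs ih =>
    intro l hl
    rw [List.foldl_cons, ih (l.erase x) (hl.erase x), hl.erase_eq_filter x, List.filter_filter]
    apply List.filter_congr
    intro a _
    by_cases hx : a = x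
    · subst hx; simp
    · simp [hx]

-- B's nested fold builds the set of all cell values
theorem seen_eq_ofList_flatten (puzzle : List (List Int)) :
    puzzle.foldl (fun s row => row.foldl (fun s c => PySem.Set.add s c) s) PySem.Set.empty
      = PySem.Set.ofList puzzle.flatten := by
  rw [← List.foldl_flatten, PySem.Set.ofList_eq_foldl]
  rfl

theorem mem_detect0_iff (x : Int) :
    x ∈ ([0, 1, 2, 3, 4, 5, 6, 7, 8] : List Int) ↔ 0 ≤ x ∧ x < 9 := by
  simp
  omega

-- ===== VERDICT (by name: the statement is the Claim_ definition above) =====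
theorem Check_0_to_8_spec : Claim_equal_Check_0_to_8 := by
  intro puzzle _
  unfold Spec_Check_0_to_8 Check_0_to_8 Check_0_to_8_alt
  dsimp only
  have hrow : ∀ (d row : List Int),
      (PySem.List.pyRange 0 (PySem.List.len row) 1).foldl
          (fun d j => scanPop (PySem.List.pyGetD row j 0) d 0) d
        = row.foldl (fun d c => d.erase c) d := by
    intro d row
    simp only [scanPop_zero]
    rw [PySem.List.foldl_pyRange_zero_pyGetD]
  simp only [hrow]
  rw [PySem.List.foldl_pyRange_zero_pyGetD, ← List.foldl_flatten, foldl_erase_eq_filter _ _ (by decide), seen_eq_ofList_flatten,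
      Bool.eq_iff_iff]
  simp only [decide_eq_true_eq, List.length_eq_zero_iff, List.filter_eq_nil_iff,
    PySem.Set.issubset_iff, PySem.Set.mem_ofList, PySem.List.mem_pyRange_one,
    Bool.not_eq_eq_eq_not, Bool.not_true, List.contains_eq_mem, decide_eq_false_iff_not,
    not_not]
  constructor
  · intro h x hx
    exact h x ((mem_detect0_iff x).mpr hx)
  · intro h x hx
    exact h x ((mem_detect0_iff x).mp hx)
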